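-- pv_equiv track=rewrite | github.com/ravikmrsingh8/coding-practice | leetcode/main.py | get_examples
-- ===== SOURCE A (Python) =====
-- def strip(line):
--     return line.rstrip('\n')
--
-- def get_examples(lines):
--     indexes = [i for i, val in enumerate(lines) if val.strip().startswith("Example ")]
--     example = []
--     for i in range(len(indexes)):
--         example.append("#### {0}\n".format(lines[indexes[i]]))
--         example_details = lines[indexes[i] + 1 : indexes[i + 1]] if i + 1 < len(indexes) else lines[indexes[i]+1:]
--         example_details = [detail for detail in example_details if len(strip(detail)) > 0]
--         example.append("```\n")
--         example += example_details
--         example.append("\n```\n")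
--
--     return example
-- ===== SOURCE B (Python) =====
-- def strip(line):
--     return line.rstrip('\n')
--
-- def get_examples(lines):
--     example = []
--     opened = False
--     for line in lines:
--         if line.strip().startswith("Example "):
--             if opened:
--                 example.append("\n```\n")
--             example.append("#### {0}\n".format(line))
--             example.append("```\n")
--             opened = True
--         elif opened and len(strip(line)) > 0:
--             example.append(line)
--     if opened:
--         example.append("\n```\n")
--     return example
-- ===== Notes on version B (the rewrite author's own statement) =====
-- stated objective: alternative
-- what changed: Replaced the collect-all-Example-indexes-then-slice-between-consecutive-indexes approach by a single streaming pass that keeps a boolean 'block open' state, closing fences lazily at the next header or at end of input.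
import Mathlib
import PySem

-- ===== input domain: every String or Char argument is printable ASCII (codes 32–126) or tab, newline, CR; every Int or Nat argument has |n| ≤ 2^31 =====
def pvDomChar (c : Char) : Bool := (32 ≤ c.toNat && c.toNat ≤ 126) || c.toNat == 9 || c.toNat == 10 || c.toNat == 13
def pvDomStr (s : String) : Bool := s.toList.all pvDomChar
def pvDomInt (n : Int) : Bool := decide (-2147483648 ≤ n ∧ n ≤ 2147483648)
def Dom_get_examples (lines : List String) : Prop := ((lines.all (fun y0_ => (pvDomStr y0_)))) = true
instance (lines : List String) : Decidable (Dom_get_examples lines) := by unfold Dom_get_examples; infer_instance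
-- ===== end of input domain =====

-- B replaces A's index-list-then-slice decomposition by one streaming pass with a boolean
-- 'block open' state (alternative decomposition, same asymptotic cost).


-- ===== PORT A =====
-- helper `strip(line) = line.rstrip('\n')` (ported by hand: drop trailing '\n' characters; exact)
def pvStripNl (line : String) : String :=
  String.ofList ((line.toList.reverse.dropWhile (fun c => c == '\n')).reverse)

-- `val.strip().startswith("Example ")`
def pvIsEx (l : String) : Bool := PySem.Str.startswith (PySem.Str.strip l) "Example "

-- `len(strip(detail)) > 0`
def pvKeep (d : String) : Bool := decide (0 < PySem.Str.len (pvStripNl d))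

-- the body of A's `for i in range(len(indexes))` loop, as structural recursion over the
-- remaining index list (`indexes[i+1]` = head of the rest; `rest.head? = none` is A's
-- `else lines[indexes[i]+1:]` branch — slice with stop `none` is slice-to-end)
def pvGoA (lines : List String) : List Int → List String
  | [] => []
  | i :: rest =>
      let header := "#### " ++ PySem.List.pyGetD lines i "" ++ "\n"   -- index from enumerate, always in range
      let seg := PySem.List.slice lines (some (i + 1)) rest.head?
      let details := seg.filter (fun d => pvKeep d)
      header :: "```\n" :: (details ++ ("\n```\n" :: pvGoA lines rest))

def get_examples (lines : List String) : List String :=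
  let indexes : List Int :=
    ((PySem.List.enumerate lines 0).filter (fun p => pvIsEx p.2)).map (fun p => p.1)
  pvGoA lines indexes

-- ===== PORT B =====
-- streaming pass: state = (output so far, is a block open)
def pvStepB (st : List String × Bool) (line : String) : List String × Bool :=
  if pvIsEx line then
    (st.1 ++ (if st.2 then ["\n```\n"] else []) ++ ["#### " ++ line ++ "\n", "```\n"], true)
  else if st.2 && pvKeep line then (st.1 ++ [line], st.2)
  else st

def get_examples_alt (lines : List String) : List String :=
  let st := lines.foldl pvStepB ([], false)
  if st.2 then st.1 ++ ["\n```\n"] else st.1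

-- ===== PRECONDITION & SPEC =====
def Spec_get_examples (lines : List String) (out : List String) : Prop := out = get_examples_alt lines
instance (lines : List String) (out : List String) : Decidable (Spec_get_examples lines out) := by unfold Spec_get_examples; infer_instance

-- ===== CLAIM (what is proved, stated in full; the proofs are below) =====
def Claim_equal_get_examples : Prop := ∀ (lines : List String), Dom_get_examples lines → Spec_get_examples lines (get_examples lines)

-- ===== LEMMAS AND PROOFS =====

-- reference semantics: pvRun op ls = output produced from the remaining lines ls with a block
-- open iff op (including the final closing fence)
def pvRun : Bool → List String → List String
  | op, [] => if op then ["\n```\n"] else []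
  | op, l :: ls =>
      if pvIsEx l then
        (if op then ["\n```\n"] else []) ++ ("#### " ++ l ++ "\n") :: "```\n" :: pvRun true ls
      else if op && pvKeep l then l :: pvRun op ls
      else pvRun op ls

-- Nat-level index list of the Example lines, starting at offset s
def pvIdx : List String → Nat → List Nat
  | [], _ => []
  | l :: ls, s => if pvIsEx l then s :: pvIdx ls (s + 1) else pvIdx ls (s + 1)

-- explicit Nat→Int cast of an index list (avoids elaborating through the list coercion)
def pvCastL (xs : List Nat) : List Int := xs.map (fun n => Int.ofNat n)

theorem pvCastL_nil : pvCastL [] = [] := rfl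

theorem pvCastL_cons (k : Nat) (t : List Nat) : pvCastL (k :: t) = ((k : Nat) : Int) :: pvCastL t := by
  simp [pvCastL]

theorem pvB_run : ∀ (ls : List String) (acc : List String) (op : Bool),
    (let st := ls.foldl pvStepB (acc, op)
     if st.2 then st.1 ++ ["\n```\n"] else st.1) = acc ++ pvRun op ls := by
  intro ls
  induction ls with
  | nil => intro acc op; cases op <;> simp [pvRun]
  | cons l ls ih =>
    intro acc op
    rw [List.foldl_cons]
    by_cases hex : pvIsEx l
    · rw [show pvStepB (acc, op) l
          = (acc ++ (if op then ["\n```\n"] else []) ++ ["#### " ++ l ++ "\n", "```\n"], true) from by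
        simp [pvStepB, hex]]
      rw [ih]
      cases op <;> simp [pvRun, hex]
    · by_cases hk : op && pvKeep l
      · rw [show pvStepB (acc, op) l = (acc ++ [l], op) from by simp [pvStepB, hex, hk]]
        rw [ih]
        rcases Bool.and_eq_true_iff.mp hk with ⟨h1, h2⟩
        subst h1
        simp [pvRun, hex, h2]
      · rw [show pvStepB (acc, op) l = (acc, op) from by simp [pvStepB, hex, hk]]
        rw [ih]
        cases op
        · simp [pvRun, hex]
        · simp only [Bool.true_and] at hk
          simp [pvRun, hex, hk]

theorem pvIdx_shift : ∀ (ls : List String) (a b : Nat),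
    pvIdx ls (a + b) = (pvIdx ls b).map (fun n => n + a) := by
  intro ls
  induction ls with
  | nil => intro a b; simp [pvIdx]
  | cons l ls ih =>
    intro a b
    by_cases h : pvIsEx l
    · simp only [pvIdx, h, if_pos]
      rw [show a + b + 1 = a + (b + 1) by omega, ih]
      simp [Nat.add_comm]
    · simp only [pvIdx, h, if_neg, Bool.false_eq_true, not_false_iff]
      rw [show a + b + 1 = a + (b + 1) by omega, ih]

theorem pvIdx_enumerate : ∀ (ls : List String) (s : Nat),
    ((PySem.List.enumerate ls (s : Int)).filter (fun p => pvIsEx p.2)).map (fun p => p.1)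
      = pvCastL (pvIdx ls s) := by
  intro ls
  induction ls with
  | nil => intro s; simp [PySem.List.enumerate, pvIdx, pvCastL]
  | cons l ls ih =>
    intro s
    have ih' := ih (s + 1)
    simp only [Nat.cast_add, Nat.cast_one] at ih'
    rw [PySem.List.enumerate]
    by_cases h : pvIsEx l <;>
      simp [pvIdx, h, pvCastL, ih']

theorem pvIdx_nil_iff (ls : List String) (s : Nat) :
    pvIdx ls s = [] ↔ ∀ l ∈ ls, pvIsEx l = false := by
  induction ls generalizing s with
  | nil => simp [pvIdx]
  | cons l ls ih =>
    by_cases h : pvIsEx l <;> simp [pvIdx, h, ih]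

-- an open run over Example-free lines is the kept lines plus the closing fence
theorem pvRun_true_none : ∀ (ls : List String), (∀ x ∈ ls, pvIsEx x = false) →
    pvRun true ls = ls.filter (fun d => pvKeep d) ++ ["\n```\n"] := by
  intro ls
  induction ls with
  | nil => intro _; simp [pvRun]
  | cons x xs ihx =>
    intro hnone
    have hx := hnone x (by simp)
    have hxs : ∀ y ∈ xs, pvIsEx y = false := fun y hy => hnone y (by simp [hy])
    by_cases hkp : pvKeep x <;> simp [pvRun, hx, hkp, ihx hxs]

-- if the first Example in ls is at position k, the open-block run is the kept prefix,
-- a closing fence, and a fresh (closed) run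
theorem pvRun_true_of_first : ∀ (ls : List String) (k : Nat) (t : List Nat),
    pvIdx ls 0 = k :: t →
    pvRun true ls = (ls.take k).filter (fun d => pvKeep d) ++ "\n```\n" :: pvRun false ls := by
  intro ls
  induction ls with
  | nil => intro k t h; simp [pvIdx] at h
  | cons l ls ih =>
    intro k t h
    by_cases hex : pvIsEx l
    · simp only [pvIdx, hex, if_pos] at h
      obtain ⟨hk, _⟩ := List.cons.injEq .. ▸ h
      have hk0 : k = 0 := hk.symm
      subst hk0
      simp [pvRun, hex]
    · simp only [pvIdx, hex, if_neg, Bool.false_eq_true, not_false_iff] at h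
      rw [show (0 : Nat) + 1 = 1 + 0 by omega, pvIdx_shift] at h
      cases hidx : pvIdx ls 0 with
      | nil => rw [hidx] at h; simp at h
      | cons k' t' =>
        rw [hidx] at h
        simp only [List.map_cons] at h
        obtain ⟨hk, _⟩ := List.cons.injEq .. ▸ h
        have hk' : k = k' + 1 := by omega
        subst hk'
        by_cases hkp : pvKeep l
        · simp only [pvRun, hex, if_neg, Bool.false_eq_true, not_false_iff,
            Bool.true_and, hkp, if_pos]
          rw [ih k' t' hidx]
          simp [hkp, List.take_succ_cons]
        · simp only [pvRun, hex, if_neg, Bool.false_eq_true, not_false_iff,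
            Bool.true_and, hkp]
          rw [ih k' t' hidx]
          simp [hkp, List.take_succ_cons]

theorem pvGoA_run : ∀ (ls pre : List String),
    pvGoA (pre ++ ls) (pvCastL (pvIdx ls pre.length)) = pvRun false ls := by
  intro ls
  induction ls with
  | nil => intro pre; simp [pvIdx, pvCastL, pvGoA, pvRun]
  | cons l ls ih =>
    intro pre
    have hdrop : (pre ++ l :: ls).drop (pre.length + 1) = ls := by
      rw [show pre ++ l :: ls = (pre ++ [l]) ++ ls by simp,
        show pre.length + 1 = (pre ++ [l]).length by simp, List.drop_left]
    have hfull : (pre ++ [l]) ++ ls = pre ++ l :: ls := by simp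
    have hlen : (pre ++ [l]).length = pre.length + 1 := by simp
    by_cases hex : pvIsEx l
    · rw [show pvIdx (l :: ls) pre.length = pre.length :: pvIdx ls (pre.length + 1) from by
          simp [pvIdx, hex]]
      rw [show pvIdx ls (pre.length + 1) = (pvIdx ls 0).map (fun n => n + (pre.length + 1)) from by
          rw [show pre.length + 1 = (pre.length + 1) + 0 by omega, pvIdx_shift]]
      have hhead : PySem.List.pyGetD (pre ++ l :: ls) ((pre.length : Nat) : Int) "" = l := by
        simp [List.getD]
      cases hidx : pvIdx ls 0 with
      | nil =>
        simp only [List.map_nil, pvCastL_cons, pvCastL_nil, pvGoA, List.head?_nil]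
        have hseg : PySem.List.slice (pre ++ l :: ls) (some ((pre.length : Int) + 1)) none = ls := by
          rw [show ((pre.length : Int) + 1) = ((pre.length + 1 : Nat) : Int) by push_cast; ring,
            PySem.List.slice_from_natCast, hdrop]
        rw [hhead, hseg]
        simp [pvRun, hex, pvRun_true_none ls ((pvIdx_nil_iff ls 0).mp hidx)]
      | cons k t =>
        simp only [List.map_cons, pvCastL_cons, pvGoA, List.head?_cons]
        have hseg : PySem.List.slice (pre ++ l :: ls) (some ((pre.length : Int) + 1))
            (some ((k + (pre.length + 1) : Nat) : Int)) = ls.take k := by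
          rw [show ((pre.length : Int) + 1) = ((pre.length + 1 : Nat) : Int) by push_cast; ring,
            PySem.List.slice_natCast, hdrop, Nat.add_sub_cancel]
        have h := ih (pre ++ [l])
        rw [hfull, hlen] at h
        rw [show pvIdx ls (pre.length + 1) = (pvIdx ls 0).map (fun n => n + (pre.length + 1)) from by
            rw [show pre.length + 1 = (pre.length + 1) + 0 by omega, pvIdx_shift], hidx] at h
        simp only [List.map_cons, pvCastL_cons, pvGoA, List.head?_cons] at h
        rw [hhead, hseg, h]
        simp [pvRun, hex, pvRun_true_of_first ls k t hidx]
    · rw [show pvIdx (l :: ls) pre.length = pvIdx ls (pre.length + 1) from by simp [pvIdx, hex]]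
      have h := ih (pre ++ [l])
      rw [hfull, hlen] at h
      rw [h]
      simp [pvRun, hex]

-- ===== VERDICT (by name: the statement is the Claim_ definition above) =====
theorem get_examples_spec : Claim_equal_get_examples := by
  intro lines _
  unfold Spec_get_examples get_examples get_examples_alt
  rw [show (0 : Int) = ((0 : Nat) : Int) by simp, pvIdx_enumerate]
  have hA := pvGoA_run lines []
  simp only [List.nil_append, List.length_nil] at hA
  rw [hA]
  have hB := pvB_run lines [] false
  simp only [List.nil_append] at hB
  exact hB.symm
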